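-- pv_equiv track=rewrite | github.com/MrBrantCode/unitest_baseline | mut_generate/mist_train_cf/cf_39941/solution.py | traverse_file_system
-- ===== SOURCE A (Python) =====
-- def traverse_file_system(directory, file_map, entrypoint):
--     stack = [entrypoint]
--     result = []
--
--     while stack:
--         current = stack.pop()
--         if current in file_map:
--             for item in file_map[current]:
--                 if item.endswith(".txt"):
--                     result.append(current + "/" + item)
--                 else:
--                     stack.append(current + "/" + item)
--
--     return result
-- ===== SOURCE B (Python) =====
-- def traverse_file_system(directory, file_map, entrypoint):
--     result = []
--
--     def helper(current):
--         if current not in file_map: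
--             return
--         subdirs = []
--         for item in file_map[current]:
--             if item.endswith(".txt"):
--                 result.append(current + "/" + item)
--             else:
--                 subdirs.append(current + "/" + item)
--         for child in reversed(subdirs):
--             helper(child)
--
--     helper(entrypoint)
--     return result
-- ===== Notes on version B (the rewrite author's own statement) =====
-- stated objective: alternative
-- what changed: the explicit LIFO stack loop is replaced by a recursive DFS helper that emits .txt paths first and then recurses into the collected subdirectories in reversed order
import Mathlib
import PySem

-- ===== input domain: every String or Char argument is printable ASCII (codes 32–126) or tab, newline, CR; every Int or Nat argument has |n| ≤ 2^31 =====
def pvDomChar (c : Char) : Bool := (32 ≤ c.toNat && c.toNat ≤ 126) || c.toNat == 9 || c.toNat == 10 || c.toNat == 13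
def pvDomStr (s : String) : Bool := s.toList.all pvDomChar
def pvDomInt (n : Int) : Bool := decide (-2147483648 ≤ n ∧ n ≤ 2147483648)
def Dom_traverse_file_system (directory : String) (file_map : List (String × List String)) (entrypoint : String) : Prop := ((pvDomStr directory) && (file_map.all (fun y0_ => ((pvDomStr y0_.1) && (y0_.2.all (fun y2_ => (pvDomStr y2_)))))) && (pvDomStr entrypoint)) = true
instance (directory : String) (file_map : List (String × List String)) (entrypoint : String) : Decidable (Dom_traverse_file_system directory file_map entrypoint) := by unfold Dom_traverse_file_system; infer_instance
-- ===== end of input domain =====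

-- B re-implements A's explicit-stack DFS as a recursive DFS helper (same output, same cost).

-- ===== PORT A =====
-- shared helper: length of the longest key of file_map (used only to size the totality fuel)
def pvMaxKeyLen (file_map : List (String × List String)) : Nat :=
  file_map.foldr (fun p acc => max p.1.length acc) 0

-- totality fuel for A's while-loop: the number of iterations the loop performs,
-- pre-counted by a bounded-depth recursion (every pushed path is strictly longer,
-- so depth pvMaxKeyLen+2 always suffices)
def pvCnt : Nat → List (String × List String) → String → Nat
  | 0, _, _ => 1
  | fuel+1, file_map, current =>
    match List.lookup current file_map with
    | none => 1
    | some items =>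
      1 + (((items.filter (fun i => !(PySem.Str.endswith i ".txt"))).map
              (fun i => pvCnt fuel file_map (current ++ "/" ++ i))).sum)

-- the while-loop of A; stack top is the list head (list.append/pop at the end)
def pvLoopA : Nat → List (String × List String) → List String → List String → List String
  | 0, _, _, result => result
  | fuel+1, file_map, stack, result =>
    match stack with
    | [] => result
    | current :: rest =>
      match List.lookup current file_map with
      | none => pvLoopA fuel file_map rest result
      | some items =>
        let st := items.foldl (fun (st : List String × List String) item =>
          if PySem.Str.endswith item ".txt" then (st.1, st.2 ++ [current ++ "/" ++ item])
          else ((current ++ "/" ++ item) :: st.1, st.2)) (rest, result)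
        pvLoopA fuel file_map st.1 st.2

def traverse_file_system (directory : String) (file_map : List (String × List String)) (entrypoint : String) : List String :=
  pvLoopA (pvCnt (pvMaxKeyLen file_map + 2) file_map entrypoint) file_map [entrypoint] []

-- ===== PORT B =====
-- the recursive helper of B; fuel is only a totality guard (depth pvMaxKeyLen+2 always suffices)
def pvHelperB : Nat → List (String × List String) → String → List String
  | 0, _, _ => []
  | fuel+1, file_map, current =>
    match List.lookup current file_map with
    | none => []
    | some items =>
      let st := items.foldl (fun (st : List String × List String) item =>
        if PySem.Str.endswith item ".txt" then (st.1 ++ [current ++ "/" ++ item], st.2)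
        else (st.1, st.2 ++ [current ++ "/" ++ item])) ([], [])
      st.1 ++ st.2.reverse.flatMap (pvHelperB fuel file_map)

def traverse_file_system_alt (directory : String) (file_map : List (String × List String)) (entrypoint : String) : List String :=
  pvHelperB (pvMaxKeyLen file_map + 2) file_map entrypoint

-- ===== PRECONDITION & SPEC =====
def Spec_traverse_file_system (directory : String) (file_map : List (String × List String)) (entrypoint : String) (out : List String) : Prop := out = traverse_file_system_alt directory file_map entrypoint
instance (directory : String) (file_map : List (String × List String)) (entrypoint : String) (out : List String) : Decidable (Spec_traverse_file_system directory file_map entrypoint out) := by unfold Spec_traverse_file_system; infer_instance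

-- ===== CLAIM (what is proved, stated in full; the proofs are below) =====
def Claim_equal_traverse_file_system : Prop := ∀ (directory : String) (file_map : List (String × List String)) (entrypoint : String), Dom_traverse_file_system directory file_map entrypoint → Spec_traverse_file_system directory file_map entrypoint (traverse_file_system directory file_map entrypoint)

-- ===== LEMMAS AND PROOFS =====

def pvTxts (c : String) (items : List String) : List String :=
  (items.filter (fun i => PySem.Str.endswith i ".txt")).map (fun i => c ++ "/" ++ i)

def pvDirs (c : String) (items : List String) : List String :=
  (items.filter (fun i => !(PySem.Str.endswith i ".txt"))).map (fun i => c ++ "/" ++ i)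

theorem pv_flatMap_congr {α β : Type} {f g : α → List β} :
    ∀ (l : List α), (∀ x ∈ l, f x = g x) → l.flatMap f = l.flatMap g := by
  intro l h
  induction l with
  | nil => rfl
  | cons a t ih =>
    simp only [List.flatMap_cons]
    rw [h a (by simp), ih (fun x hx => h x (by simp [hx]))]

theorem pv_lookup_len (file_map : List (String × List String)) (s : String)
    (v : List String) (h : List.lookup s file_map = some v) :
    s.length ≤ pvMaxKeyLen file_map := by
  induction file_map with
  | nil => simp [List.lookup] at h
  | cons p t ih =>
    rw [List.lookup] at h
    by_cases hk : s == p.1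
    · have : s = p.1 := by exact eq_of_beq hk
      subst this
      simp [pvMaxKeyLen]
    · simp [hk] at h
      have := ih h
      simp [pvMaxKeyLen] at this ⊢
      omega

theorem pv_path_len (c i : String) : (c ++ "/" ++ i).length = c.length + 1 + i.length := by
  have h1 : ("/" : String).length = 1 := rfl
  simp [String.length_append, h1]

theorem pv_dir_len (c : String) (items : List String) (d : String)
    (hd : d ∈ pvDirs c items) : c.length + 1 ≤ d.length := by
  simp only [pvDirs, List.mem_map] at hd
  obtain ⟨i, _, rfl⟩ := hd
  rw [pv_path_len]
  omega

theorem pv_foldA (c : String) :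
    ∀ (items : List String) (stack result : List String),
    items.foldl (fun (st : List String × List String) item =>
      if PySem.Str.endswith item ".txt" then (st.1, st.2 ++ [c ++ "/" ++ item])
      else ((c ++ "/" ++ item) :: st.1, st.2)) (stack, result)
    = ((pvDirs c items).reverse ++ stack, result ++ pvTxts c items) := by
  intro items
  induction items with
  | nil => intro stack result; simp [pvDirs, pvTxts]
  | cons i t ih =>
    intro stack result
    by_cases h : PySem.Str.endswith i ".txt"
    · simp only [List.foldl_cons, h, if_true, ih, pvDirs, pvTxts, List.filter_cons, h,
        Bool.not_true, List.map_cons]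
      simp [h]
    · simp only [List.foldl_cons, h, if_false, ih, pvDirs, pvTxts, List.filter_cons,
        List.map_cons]
      simp [h]

theorem pv_foldB (c : String) :
    ∀ (items : List String) (acc1 acc2 : List String),
    items.foldl (fun (st : List String × List String) item =>
      if PySem.Str.endswith item ".txt" then (st.1 ++ [c ++ "/" ++ item], st.2)
      else (st.1, st.2 ++ [c ++ "/" ++ item])) (acc1, acc2)
    = (acc1 ++ pvTxts c items, acc2 ++ pvDirs c items) := by
  intro items
  induction items with
  | nil => intro acc1 acc2; simp [pvDirs, pvTxts]
  | cons i t ih =>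
    intro acc1 acc2
    by_cases h : PySem.Str.endswith i ".txt"
    · simp only [List.foldl_cons, h, if_true, ih, pvDirs, pvTxts, List.filter_cons,
        List.map_cons]
      simp [h]
    · simp only [List.foldl_cons, h, if_false, ih, pvDirs, pvTxts, List.filter_cons,
        List.map_cons]
      simp [h]

theorem pvHelperB_succ (fuel : Nat) (file_map : List (String × List String)) (s : String) :
    pvHelperB (fuel + 1) file_map s
    = match List.lookup s file_map with
      | none => []
      | some items => pvTxts s items ++ (pvDirs s items).reverse.flatMap (pvHelperB fuel file_map) := by
  cases h : List.lookup s file_map with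
  | none => simp [pvHelperB, h]
  | some items =>
    show (match List.lookup s file_map with
      | none => []
      | some items =>
        let st := items.foldl (fun (st : List String × List String) item =>
          if PySem.Str.endswith item ".txt" then (st.1 ++ [s ++ "/" ++ item], st.2)
          else (st.1, st.2 ++ [s ++ "/" ++ item])) ([], [])
        st.1 ++ st.2.reverse.flatMap (pvHelperB fuel file_map)) = _
    simp only [h, pv_foldB, List.nil_append]

theorem pvCnt_succ (fuel : Nat) (file_map : List (String × List String)) (s : String) :
    pvCnt (fuel + 1) file_map s
    = match List.lookup s file_map with
      | none => 1
      | some items => 1 + ((pvDirs s items).map (pvCnt fuel file_map)).sum := by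
  cases h : List.lookup s file_map with
  | none => simp [pvCnt, h]
  | some items =>
    show (match List.lookup s file_map with
      | none => 1
      | some items =>
        1 + (((items.filter (fun i => !(PySem.Str.endswith i ".txt"))).map
                (fun i => pvCnt fuel file_map (s ++ "/" ++ i))).sum)) = _
    simp only [h, pvDirs, List.map_map]
    rfl

theorem pv_stabB (file_map : List (String × List String)) :
    ∀ (fuel : Nat) (s : String), pvMaxKeyLen file_map + 1 ≤ s.length + fuel →
    pvHelperB fuel file_map s = pvHelperB (fuel + 1) file_map s := by
  intro fuel
  induction fuel with
  | zero =>
    intro s hs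
    rw [pvHelperB_succ]
    cases h : List.lookup s file_map with
    | none => rfl
    | some v =>
      have := pv_lookup_len file_map s v h
      omega
  | succ f ih =>
    intro s hs
    rw [pvHelperB_succ, pvHelperB_succ]
    cases h : List.lookup s file_map with
    | none => rfl
    | some items =>
      simp only []
      congr 1
      apply pv_flatMap_congr
      intro d hd
      have hlen := pv_dir_len s items d (by exact List.mem_reverse.mp hd)
      exact ih d (by omega)

theorem pv_stabC (file_map : List (String × List String)) :
    ∀ (fuel : Nat) (s : String), pvMaxKeyLen file_map + 1 ≤ s.length + fuel →
    pvCnt fuel file_map s = pvCnt (fuel + 1) file_map s := by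
  intro fuel
  induction fuel with
  | zero =>
    intro s hs
    rw [pvCnt_succ]
    cases h : List.lookup s file_map with
    | none => rfl
    | some v =>
      have := pv_lookup_len file_map s v h
      omega
  | succ f ih =>
    intro s hs
    rw [pvCnt_succ, pvCnt_succ]
    cases h : List.lookup s file_map with
    | none => rfl
    | some items =>
      simp only []
      congr 2
      apply List.map_congr_left
      intro d hd
      have hlen := pv_dir_len s items d hd
      exact ih d (by omega)

theorem pv_stabB_full (file_map : List (String × List String)) (s : String) :
    pvHelperB (pvMaxKeyLen file_map + 1) file_map s
      = pvHelperB (pvMaxKeyLen file_map + 2) file_map s :=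
  pv_stabB file_map (pvMaxKeyLen file_map + 1) s (by omega)

theorem pv_stabC_full (file_map : List (String × List String)) (s : String) :
    pvCnt (pvMaxKeyLen file_map + 1) file_map s
      = pvCnt (pvMaxKeyLen file_map + 2) file_map s :=
  pv_stabC file_map (pvMaxKeyLen file_map + 1) s (by omega)

theorem pv_D_unfold (file_map : List (String × List String)) (s : String) :
    pvHelperB (pvMaxKeyLen file_map + 2) file_map s
    = match List.lookup s file_map with
      | none => []
      | some items => pvTxts s items
          ++ (pvDirs s items).reverse.flatMap (pvHelperB (pvMaxKeyLen file_map + 2) file_map) := by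
  rw [show pvMaxKeyLen file_map + 2 = (pvMaxKeyLen file_map + 1) + 1 from rfl, pvHelperB_succ]
  cases h : List.lookup s file_map with
  | none => rfl
  | some items =>
    simp only []
    congr 1
    exact pv_flatMap_congr _ (fun d _ => pv_stabB_full file_map d)

theorem pv_C_unfold (file_map : List (String × List String)) (s : String) :
    pvCnt (pvMaxKeyLen file_map + 2) file_map s
    = match List.lookup s file_map with
      | none => 1
      | some items =>
          1 + ((pvDirs s items).map (pvCnt (pvMaxKeyLen file_map + 2) file_map)).sum := by
  rw [show pvMaxKeyLen file_map + 2 = (pvMaxKeyLen file_map + 1) + 1 from rfl, pvCnt_succ]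
  cases h : List.lookup s file_map with
  | none => rfl
  | some items =>
    simp only []
    congr 2
    exact List.map_congr_left (fun d _ => pv_stabC_full file_map d)

theorem pv_C_pos (file_map : List (String × List String)) (s : String) :
    1 ≤ pvCnt (pvMaxKeyLen file_map + 2) file_map s := by
  rw [pv_C_unfold]
  cases List.lookup s file_map <;> simp

theorem pv_main (file_map : List (String × List String)) :
    ∀ (n : Nat) (stack result : List String),
    (stack.map (pvCnt (pvMaxKeyLen file_map + 2) file_map)).sum ≤ n →
    pvLoopA n file_map stack result
      = result ++ stack.flatMap (pvHelperB (pvMaxKeyLen file_map + 2) file_map) := by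
  intro n
  induction n with
  | zero =>
    intro stack result h
    cases stack with
    | nil => simp [pvLoopA]
    | cons c rest =>
      exfalso
      have := pv_C_pos file_map c
      simp only [List.map_cons, List.sum_cons] at h
      omega
  | succ n ih =>
    intro stack result h
    cases stack with
    | nil => simp [pvLoopA]
    | cons c rest =>
      have hC := pv_C_unfold file_map c
      have hD := pv_D_unfold file_map c
      simp only [List.map_cons, List.sum_cons] at h
      cases hl : List.lookup c file_map with
      | none =>
        simp only [hl] at hC hD
        have hrec := ih rest result (by omega)
        simp only [pvLoopA, hl, hrec, List.flatMap_cons, hD, List.nil_append]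
      | some items =>
        simp only [hl] at hC hD
        simp only [pvLoopA, hl, pv_foldA]
        rw [hC] at h
        have hsum : (((pvDirs c items).reverse ++ rest).map
            (pvCnt (pvMaxKeyLen file_map + 2) file_map)).sum ≤ n := by
          simp only [List.map_append, List.sum_append, List.map_reverse, List.sum_reverse]
          linarith
        rw [ih _ _ hsum]
        simp [hD, List.flatMap_append]

-- ===== VERDICT (by name: the statement is the Claim_ definition above) =====
theorem traverse_file_system_spec : Claim_equal_traverse_file_system := by
  intro directory file_map entrypoint _
  show _ = _
  unfold traverse_file_system traverse_file_system_alt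
  rw [pv_main file_map _ [entrypoint] [] (by simp)]
  simp
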